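-- pv_equiv track=rewrite | github.com/NuReLeS525/BAP | 1841C.py | calculate
-- ===== SOURCE A (Python) =====
-- def calculate(s):
--     a = b = c = d = e = False
--     total = 0
--
--     for i in range(len(s) - 1, -1, -1):
--         if s[i] == 'A':
--             a = True
--             total += -1 if (b or c or d or e) else 1
--         elif s[i] == 'B':
--             b = True
--             total += -10 if (c or d or e) else 10
--         elif s[i] == 'C':
--             c = True
--             total += -100 if (d or e) else 100
--         elif s[i] == 'D':
--             d = True
--             total += -1000 if e else 1000
--         elif s[i] == 'E':
--             e = True
--             total += 10000
--
--     return total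
-- ===== SOURCE B (Python) =====
-- def calculate(s):
--     # Two forward passes: count each letter, then scan left-to-right,
--     # keeping counters of occurrences remaining in the suffix.
--     na = nb = nc = nd = ne = 0
--     for ch in s:
--         if ch == 'A': na += 1
--         elif ch == 'B': nb += 1
--         elif ch == 'C': nc += 1
--         elif ch == 'D': nd += 1
--         elif ch == 'E': ne += 1
--     total = 0
--     for ch in s:
--         if ch == 'A':
--             na -= 1
--             total += -1 if (nb or nc or nd or ne) else 1
--         elif ch == 'B':
--             nb -= 1
--             total += -10 if (nc or nd or ne) else 10
--         elif ch == 'C':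
--             nc -= 1
--             total += -100 if (nd or ne) else 100
--         elif ch == 'D':
--             nd -= 1
--             total += -1000 if ne else 1000
--         elif ch == 'E':
--             ne -= 1
--             total += 10000
--     return total
-- ===== Notes on version B (the rewrite author's own statement) =====
-- stated objective: alternative
-- what changed: Replaced the reverse index scan with five boolean seen-flags by two forward passes: count each letter once, then scan left-to-right with counters of occurrences remaining in the suffix to decide each character's sign.
import Mathlib
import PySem

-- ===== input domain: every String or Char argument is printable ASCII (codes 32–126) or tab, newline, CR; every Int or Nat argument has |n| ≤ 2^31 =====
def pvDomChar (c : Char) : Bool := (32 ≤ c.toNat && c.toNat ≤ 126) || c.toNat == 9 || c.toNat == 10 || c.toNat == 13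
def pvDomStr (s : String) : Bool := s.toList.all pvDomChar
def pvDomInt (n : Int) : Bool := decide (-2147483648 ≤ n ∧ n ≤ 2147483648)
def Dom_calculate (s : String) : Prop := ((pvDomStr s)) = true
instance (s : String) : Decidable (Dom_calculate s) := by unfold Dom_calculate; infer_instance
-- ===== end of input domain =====

-- B replaces A's reverse scan with five seen-flags by two forward passes (count letters,
-- then scan with remaining-suffix counters); objective: alternative decomposition, same cost.

-- ===== PORT A =====
def calcStepA (st : Bool × Bool × Bool × Bool × Bool × Int) (ch : Char) :
    Bool × Bool × Bool × Bool × Bool × Int :=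
  match st with
  | (a, b, c, d, e, t) =>
    if ch = 'A' then (true, b, c, d, e, t + (if b || c || d || e then -1 else 1))
    else if ch = 'B' then (a, true, c, d, e, t + (if c || d || e then -10 else 10))
    else if ch = 'C' then (a, b, true, d, e, t + (if d || e then -100 else 100))
    else if ch = 'D' then (a, b, c, true, e, t + (if e then -1000 else 1000))
    else if ch = 'E' then (a, b, c, d, true, t + 10000)
    else (a, b, c, d, e, t)

def calculate (s : String) : Int :=
  let l := s.toList
  -- for i in range(len(s) - 1, -1, -1): read s[i] (always in range) and update flags/total
  let st := (PySem.List.pyRange ((l.length : Int) - 1) (-1) (-1)).foldl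
    (fun st i =>
      match PySem.List.pyGet? l i with
      | some ch => calcStepA st ch
      | none => st)
    (false, false, false, false, false, 0)
  st.2.2.2.2.2

-- ===== PORT B =====
def countStepB (st : Int × Int × Int × Int × Int) (ch : Char) : Int × Int × Int × Int × Int :=
  match st with
  | (na, nb, nc, nd, ne) =>
    if ch = 'A' then (na + 1, nb, nc, nd, ne)
    else if ch = 'B' then (na, nb + 1, nc, nd, ne)
    else if ch = 'C' then (na, nb, nc + 1, nd, ne)
    else if ch = 'D' then (na, nb, nc, nd + 1, ne)
    else if ch = 'E' then (na, nb, nc, nd, ne + 1)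
    else (na, nb, nc, nd, ne)

def calcStepB (st : Int × Int × Int × Int × Int × Int) (ch : Char) :
    Int × Int × Int × Int × Int × Int :=
  match st with
  | (na, nb, nc, nd, ne, t) =>
    if ch = 'A' then (na - 1, nb, nc, nd, ne, t + (if nb != 0 || nc != 0 || nd != 0 || ne != 0 then -1 else 1))
    else if ch = 'B' then (na, nb - 1, nc, nd, ne, t + (if nc != 0 || nd != 0 || ne != 0 then -10 else 10))
    else if ch = 'C' then (na, nb, nc - 1, nd, ne, t + (if nd != 0 || ne != 0 then -100 else 100))
    else if ch = 'D' then (na, nb, nc, nd - 1, ne, t + (if ne != 0 then -1000 else 1000))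
    else if ch = 'E' then (na, nb, nc, nd, ne - 1, t + 10000)
    else (na, nb, nc, nd, ne, t)

def calculate_alt (s : String) : Int :=
  let l := s.toList
  let counts := l.foldl countStepB (0, 0, 0, 0, 0)
  let st := l.foldl calcStepB (counts.1, counts.2.1, counts.2.2.1, counts.2.2.2.1, counts.2.2.2.2, 0)
  st.2.2.2.2.2

-- ===== PRECONDITION & SPEC =====
def Spec_calculate (s : String) (out : Int) : Prop := out = calculate_alt s
instance (s : String) (out : Int) : Decidable (Spec_calculate s out) := by unfold Spec_calculate; infer_instance

-- ===== CLAIM (what is proved, stated in full; the proofs are below) =====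
def Claim_equal_calculate : Prop := ∀ (s : String), Dom_calculate s → Spec_calculate s (calculate s)

-- ===== LEMMAS AND PROOFS =====

-- Reference value: forward recursion; a char's contribution depends only on which
-- strictly greater letters occur in the rest of the string.
def contribS (ch : Char) (rest : List Char) : Int :=
  if ch = 'A' then (if rest.contains 'B' || rest.contains 'C' || rest.contains 'D' || rest.contains 'E' then -1 else 1)
  else if ch = 'B' then (if rest.contains 'C' || rest.contains 'D' || rest.contains 'E' then -10 else 10)
  else if ch = 'C' then (if rest.contains 'D' || rest.contains 'E' then -100 else 100)
  else if ch = 'D' then (if rest.contains 'E' then -1000 else 1000)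
  else if ch = 'E' then 10000
  else 0

def aspec : List Char → Int
  | [] => 0
  | c :: rest => aspec rest + contribS c rest


theorem foldr_calcStepA (l : List Char) :
    List.foldr (fun ch st => calcStepA st ch) (false, false, false, false, false, 0) l
    = (l.contains 'A', l.contains 'B', l.contains 'C', l.contains 'D', l.contains 'E', aspec l) := by
  induction l with
  | nil => simp [aspec]
  | cons c rest ih =>
      rw [List.foldr_cons, ih]
      show calcStepA _ c = _
      by_cases hA : c = 'A'
      · simp [calcStepA, contribS, aspec, hA, List.contains_cons]
      · by_cases hB : c = 'B'
        · simp [calcStepA, contribS, aspec, hA, hB, List.contains_cons]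
        · by_cases hC : c = 'C'
          · simp [calcStepA, contribS, aspec, hA, hB, hC, List.contains_cons]
          · by_cases hD : c = 'D'
            · simp [calcStepA, contribS, aspec, hA, hB, hC, hD, List.contains_cons]
            · by_cases hE : c = 'E'
              · simp [calcStepA, contribS, aspec, hA, hB, hC, hD, hE, List.contains_cons]
              · simp [calcStepA, contribS, aspec, hA, hB, hC, hD, hE, List.contains_cons,
                  Ne.symm hA, Ne.symm hB, Ne.symm hC, Ne.symm hD, Ne.symm hE]

theorem loopA_eq_foldl_reverse (l : List Char) (init : Bool × Bool × Bool × Bool × Bool × Int) :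
    (PySem.List.pyRange ((l.length : Int) - 1) (-1) (-1)).foldl
      (fun st i =>
        match PySem.List.pyGet? l i with
        | some ch => calcStepA st ch
        | none => st) init
    = List.foldl calcStepA init l.reverse := by
  induction l using List.reverseRecOn generalizing init with
  | nil =>
      rw [PySem.List.pyRange_neg_one_eq_nil (by norm_num)]
      rfl
  | append_singleton xs c ih =>
      have hlen : (((xs ++ [c]).length : Int)) - 1 = (xs.length : Int) := by
        simp
      rw [hlen, PySem.List.pyRange_neg_one_cons (by omega)]
      rw [List.foldl_cons]
      rw [PySem.List.pyGet?_append_length]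
      have hcongr :
          (PySem.List.pyRange ((xs.length : Int) - 1) (-1) (-1)).foldl
            (fun st i =>
              match PySem.List.pyGet? (xs ++ [c]) i with
              | some ch => calcStepA st ch
              | none => st) (calcStepA init c)
          = (PySem.List.pyRange ((xs.length : Int) - 1) (-1) (-1)).foldl
            (fun st i =>
              match PySem.List.pyGet? xs i with
              | some ch => calcStepA st ch
              | none => st) (calcStepA init c) := by
        apply PySem.List.foldl_congr_mem
        intro acc i hi
        rw [PySem.List.mem_pyRange_neg_one] at hi
        have h0 : 0 ≤ i := by omega
        have hlt : i.toNat < xs.length := by omega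
        rw [PySem.List.pyGet?_of_nonneg (xs ++ [c]) h0, PySem.List.pyGet?_of_nonneg xs h0,
          List.getElem?_append_left hlt]
      rw [hcongr, ih]
      simp

theorem count_bne_eq_contains (l : List Char) (x : Char) :
    (((l.count x : Int)) != 0) = l.contains x := by
  by_cases h : x ∈ l
  · have hp : 0 < l.count x := List.count_pos_iff.mpr h
    simp [h]
    omega
  · have hz : l.count x = 0 := List.count_eq_zero.mpr h
    simp [h, hz]

theorem countStepB_foldl (l : List Char) (na nb nc nd ne : Int) :
    List.foldl countStepB (na, nb, nc, nd, ne) l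
    = (na + l.count 'A', nb + l.count 'B', nc + l.count 'C', nd + l.count 'D', ne + l.count 'E') := by
  induction l generalizing na nb nc nd ne with
  | nil => simp
  | cons c rest ih =>
      rw [List.foldl_cons]
      show List.foldl countStepB (countStepB (na, nb, nc, nd, ne) c) rest = _
      by_cases hA : c = 'A'
      · simp [countStepB, hA, ih, List.count_cons, Prod.mk.injEq]
        all_goals omega
      · by_cases hB : c = 'B'
        · simp [countStepB, hA, hB, ih, List.count_cons, Prod.mk.injEq]
          all_goals omega
        · by_cases hC : c = 'C'
          · simp [countStepB, hA, hB, hC, ih, List.count_cons, Prod.mk.injEq]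
            all_goals omega
          · by_cases hD : c = 'D'
            · simp [countStepB, hA, hB, hC, hD, ih, List.count_cons, Prod.mk.injEq]
              all_goals omega
            · by_cases hE : c = 'E'
              · simp [countStepB, hA, hB, hC, hD, hE, ih, List.count_cons, Prod.mk.injEq]
                all_goals omega
              · simp [countStepB, hA, hB, hC, hD, hE, ih, List.count_cons, Prod.mk.injEq,
                  Ne.symm hA, Ne.symm hB, Ne.symm hC, Ne.symm hD, Ne.symm hE]

theorem calcStepB_step (c : Char) (rest : List Char) (t : Int) :
    calcStepB (((c :: rest).count 'A' : Int), ((c :: rest).count 'B' : Int),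
      ((c :: rest).count 'C' : Int), ((c :: rest).count 'D' : Int), ((c :: rest).count 'E' : Int), t) c
    = ((rest.count 'A' : Int), (rest.count 'B' : Int), (rest.count 'C' : Int),
      (rest.count 'D' : Int), (rest.count 'E' : Int), t + contribS c rest) := by
  by_cases hA : c = 'A'
  · simp [calcStepB, contribS, hA, List.count_cons, count_bne_eq_contains, Prod.mk.injEq]
  · by_cases hB : c = 'B'
    · simp [calcStepB, contribS, hA, hB, List.count_cons, count_bne_eq_contains, Prod.mk.injEq]
    · by_cases hC : c = 'C'
      · simp [calcStepB, contribS, hA, hB, hC, List.count_cons, count_bne_eq_contains, Prod.mk.injEq]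
      · by_cases hD : c = 'D'
        · simp [calcStepB, contribS, hA, hB, hC, hD, List.count_cons, count_bne_eq_contains, Prod.mk.injEq]
        · by_cases hE : c = 'E'
          · simp [calcStepB, contribS, hA, hB, hC, hD, hE, List.count_cons, count_bne_eq_contains, Prod.mk.injEq]
          · simp [calcStepB, contribS, hA, hB, hC, hD, hE, List.count_cons, count_bne_eq_contains,
              Prod.mk.injEq, Ne.symm hA, Ne.symm hB, Ne.symm hC, Ne.symm hD, Ne.symm hE]

theorem calcStepB_foldl (l : List Char) (t : Int) :
    (List.foldl calcStepB
      ((l.count 'A' : Int), (l.count 'B' : Int), (l.count 'C' : Int),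
       (l.count 'D' : Int), (l.count 'E' : Int), t) l).2.2.2.2.2
    = t + aspec l := by
  induction l generalizing t with
  | nil => simp [aspec]
  | cons c rest ih =>
      rw [List.foldl_cons, calcStepB_step, ih]
      show t + contribS c rest + aspec rest = t + (aspec rest + contribS c rest)
      omega

theorem calculate_eq_aspec (s : String) : calculate s = aspec s.toList := by
  unfold calculate
  simp only []
  rw [loopA_eq_foldl_reverse, List.foldl_reverse, foldr_calcStepA]

theorem calculate_alt_eq_aspec (s : String) : calculate_alt s = aspec s.toList := by
  unfold calculate_alt
  simp only [countStepB_foldl]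
  have h := calcStepB_foldl s.toList 0
  simp only [Int.zero_add] at h ⊢
  exact h


-- ===== VERDICT (by name: the statement is the Claim_ definition above) =====
theorem calculate_spec : Claim_equal_calculate := by
  intro s _
  unfold Spec_calculate
  rw [calculate_eq_aspec, calculate_alt_eq_aspec]
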